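-- pv_equiv track=rewrite | github.com/GabreanuR/QR-Code-Reader-Writer | decoder.py | rearrange_qr_data
-- ===== SOURCE A (Python) =====
-- def rearrange_qr_data(bitstream, version):
--     # Versiunile 1 și 2 au un singur bloc, deci nu necesită rearanjare
--     if version <= 2:
--         return bitstream
--
--     # Împărțim șirul de biți în bytes (grupuri de câte 8 biți)
--     byte_list = [bitstream[i:i + 8] for i in range(0, len(bitstream), 8)]
--
--     # Mapăm versiunea la numărul de blocuri corespunzător
--     blocks_count_map = {3: 2, 4: 4, 5: 4, 6: 4}
--     num_blocks = blocks_count_map.get(version, 4)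
--
--     # Inițializăm lista de blocuri (ex: [[], [], [], []])
--     blocks = [[] for _ in range(num_blocks)]
--
--     # Distribuim bytes în blocuri folosind tehnica interleaving
--     for i, byte in enumerate(byte_list):
--         # Caz particular pentru Versiunea 5 (distribuție asimetrică a bytes)
--         if version == 5:
--             if i == 44:
--                 blocks[2].append(byte)
--             elif i == 45:
--                 blocks[3].append(byte)
--             else:
--                 blocks[i % 4].append(byte)
--         else:
--             # Distribuție standard (Round Robin)
--             blocks[i % num_blocks].append(byte)
--
--     # Reconstruim șirul final prin concatenarea blocurilor
--     return "".join("".join(block) for block in blocks)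
-- ===== SOURCE B (Python) =====
-- def rearrange_qr_data(bitstream, version):
--     # Gather-by-destination: compute each byte's destination block with a key
--     # function and emit blocks by filtering, instead of scattering into
--     # per-block accumulator lists.
--     if version <= 2:
--         return bitstream
--
--     byte_list = [bitstream[i:i + 8] for i in range(0, len(bitstream), 8)]
--     num_blocks = {3: 2, 4: 4, 5: 4, 6: 4}.get(version, 4)
--
--     def dest(i):
--         if version == 5 and i == 44:
--             return 2
--         if version == 5 and i == 45:
--             return 3
--         return i % num_blocks
--
--     return "".join(byte
--                    for k in range(num_blocks)
--                    for i, byte in enumerate(byte_list)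
--                    if dest(i) == k)
-- ===== Notes on version B (the rewrite author's own statement) =====
-- stated objective: alternative
-- what changed: Replaces A's scatter loop into per-block accumulator lists with a destination key function and a gather-by-filter pass per block (a comprehension over blocks then indices), eliminating the mutable block lists.
import Mathlib
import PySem

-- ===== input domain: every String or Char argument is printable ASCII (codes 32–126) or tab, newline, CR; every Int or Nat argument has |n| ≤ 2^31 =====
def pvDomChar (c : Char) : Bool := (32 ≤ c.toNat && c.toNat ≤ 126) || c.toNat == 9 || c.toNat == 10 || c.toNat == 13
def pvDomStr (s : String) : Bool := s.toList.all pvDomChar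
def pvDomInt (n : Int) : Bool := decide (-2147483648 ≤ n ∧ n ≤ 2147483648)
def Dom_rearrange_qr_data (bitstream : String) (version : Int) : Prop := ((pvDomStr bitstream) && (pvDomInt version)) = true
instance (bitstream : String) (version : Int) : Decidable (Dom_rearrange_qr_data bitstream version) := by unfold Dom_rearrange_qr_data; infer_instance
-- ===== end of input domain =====

-- B replaces A's scatter loop into per-block accumulator lists by a destination
-- key function and a gather-by-filter pass per block (objective: alternative
-- decomposition, same cost).

-- ===== PORT A =====
def rearrange_qr_data (bitstream : String) (version : Int) : String :=
  if version ≤ 2 then bitstream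
  else
    let byte_list : List (List Char) :=
      (PySem.List.pyRange 0 (PySem.Str.len bitstream) 8).map
        (fun i => PySem.List.slice bitstream.toList (some i) (some (i + 8)))
    let num_blocks : Int :=
      PySem.Dict.getD (PySem.Dict.ofList ([(3, 2), (4, 4), (5, 4), (6, 4)] : List (Int × Int))) version 4
    let blocks0 : List (List (List Char)) :=
      (PySem.List.pyRange 0 num_blocks 1).map (fun _ => [])
    let blocks :=
      (PySem.List.enumerate byte_list).foldl
        (fun blocks p =>
          let i := p.1
          let byte := p.2
          if version == 5 then
            if i == 44 then
              PySem.List.pySetD blocks 2 (PySem.List.pyGetD blocks 2 [] ++ [byte])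
            else if i == 45 then
              PySem.List.pySetD blocks 3 (PySem.List.pyGetD blocks 3 [] ++ [byte])
            else
              PySem.List.pySetD blocks (PySem.Int.mod i 4)
                (PySem.List.pyGetD blocks (PySem.Int.mod i 4) [] ++ [byte])
          else
            PySem.List.pySetD blocks (PySem.Int.mod i num_blocks)
              (PySem.List.pyGetD blocks (PySem.Int.mod i num_blocks) [] ++ [byte]))
        blocks0
    String.ofList (PySem.Chars.join [] (blocks.map (fun block => PySem.Chars.join [] block)))

-- ===== PORT B =====
-- B's nested helper `dest(i)` (closure over version and num_blocks)
def pvDest (version num_blocks i : Int) : Int :=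
  if version == 5 && i == 44 then 2
  else if version == 5 && i == 45 then 3
  else PySem.Int.mod i num_blocks

def rearrange_qr_data_alt (bitstream : String) (version : Int) : String :=
  if version ≤ 2 then bitstream
  else
    let byte_list : List (List Char) :=
      (PySem.List.pyRange 0 (PySem.Str.len bitstream) 8).map
        (fun i => PySem.List.slice bitstream.toList (some i) (some (i + 8)))
    let num_blocks : Int :=
      PySem.Dict.getD (PySem.Dict.ofList ([(3, 2), (4, 4), (5, 4), (6, 4)] : List (Int × Int))) version 4
    String.ofList (PySem.Chars.join []
      ((PySem.List.pyRange 0 num_blocks 1).flatMap (fun k =>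
        ((PySem.List.enumerate byte_list).filter
            (fun p => pvDest version num_blocks p.1 == k)).map (fun p => p.2))))

-- ===== PRECONDITION & SPEC =====
def Spec_rearrange_qr_data (bitstream : String) (version : Int) (out : String) : Prop := out = rearrange_qr_data_alt bitstream version
instance (bitstream : String) (version : Int) (out : String) : Decidable (Spec_rearrange_qr_data bitstream version out) := by unfold Spec_rearrange_qr_data; infer_instance

-- ===== CLAIM (what is proved, stated in full; the proofs are below) =====
def Claim_equal_rearrange_qr_data : Prop := ∀ (bitstream : String) (version : Int), Dom_rearrange_qr_data bitstream version → Spec_rearrange_qr_data bitstream version (rearrange_qr_data bitstream version)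

-- ===== LEMMAS AND PROOFS =====

-- `"".join` with empty separator is concatenation
theorem pv_join_nil_eq_flatten (l : List (List Char)) :
    PySem.Chars.join [] l = l.flatten := by
  induction l with
  | nil => exact PySem.Chars.join_nil []
  | cons x xs ih =>
    cases xs with
    | nil => simp [PySem.Chars.join_singleton]
    | cons y ys => rw [PySem.Chars.join_cons_cons, ih]; simp

theorem pv_mod_bounds (i m : Int) (hm : 0 < m) :
    0 ≤ PySem.Int.mod i m ∧ PySem.Int.mod i m < m := by
  unfold PySem.Int.mod
  rw [Int.fmod_eq_emod]
  have h1 := Int.emod_nonneg i (by omega : m ≠ 0)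
  have h2 := Int.emod_lt_of_pos i hm
  simp [hm.le]
  omega

theorem pv_flatten_flatMap {α β : Type} (l : List α) (f : α → List (List β)) :
    (l.flatMap f).flatten = l.flatMap (fun a => (f a).flatten) := by
  induction l with
  | nil => rfl
  | cons x xs ih => simp [List.flatMap_cons, ih]

theorem pv_getD_map_const {α β : Type} (l : List α) (k : Nat) :
    (l.map (fun _ => ([] : List β))).getD k [] = [] := by
  rw [List.getD]
  rcases h : (l.map (fun _ => ([] : List β)))[k]? with _ | v
  · rfl
  · have := List.mem_of_getElem? h
    simp at this
    simp [this]

-- the scatter fold, characterised block by block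
theorem pv_scatter_spec {α : Type} (d : Int → Int) (n : Nat)
    (hd : ∀ i, 0 ≤ d i ∧ (d i).toNat < n)
    (l : List (Int × α)) (st : List (List α)) (hst : st.length = n) :
    l.foldl (fun bs p =>
        PySem.List.pySetD bs (d p.1) (PySem.List.pyGetD bs (d p.1) [] ++ [p.2])) st
      = (List.range n).map (fun k =>
          st.getD k [] ++ (l.filter (fun p => d p.1 == ((k : Nat) : Int))).map (fun p => p.2)) := by
  induction l generalizing st with
  | nil =>
    simp only [List.foldl_nil, List.filter_nil, List.map_nil, List.append_nil]
    apply List.ext_getElem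
    · simp [hst]
    · intro k hk hk'
      simp only [List.getElem_map, List.getElem_range]
      rw [List.getD_eq_getElem _ _ (by simp at hk'; omega)]
  | cons p l ih =>
    obtain ⟨hp0, hpn⟩ := hd p.1
    rw [List.foldl_cons,
        PySem.List.pySetD_of_nonneg _ _ hp0,
        PySem.List.pyGetD_of_nonneg _ _ hp0,
        ih _ (by simp [hst])]
    apply List.map_congr_left
    intro k hk
    rw [List.mem_range] at hk
    have hlt : k < st.length := by omega
    by_cases hke : (d p.1).toNat = k
    · have hkey : (d p.1 == ((k : Nat) : Int)) = true := by
        simp only [beq_iff_eq]; omega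
      subst hke
      rw [List.getD_eq_getElem _ _ (by simpa using hlt), List.getElem_set_self]
      simp [Int.toNat_of_nonneg hp0]
    · have hkey : (d p.1 == ((k : Nat) : Int)) = false := by
        simp only [beq_eq_false_iff_ne, ne_eq]; omega
      rw [List.getD_eq_getElem _ _ (by simpa using hlt),
          List.getElem_set_ne (by omega), ← List.getD_eq_getElem st [] hlt]
      simp [hkey]

-- num_blocks is 2 or 4
theorem pv_nb_cases (version : Int) :
    PySem.Dict.getD (PySem.Dict.ofList ([(3, 2), (4, 4), (5, 4), (6, 4)] : List (Int × Int))) version 4 = 2 ∨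
    PySem.Dict.getD (PySem.Dict.ofList ([(3, 2), (4, 4), (5, 4), (6, 4)] : List (Int × Int))) version 4 = 4 := by
  by_cases h3 : version = 3
  · subst h3; left; decide
  · right
    by_cases h4 : version = 4
    · subst h4; decide
    · by_cases h5 : version = 5
      · subst h5; decide
      · by_cases h6 : version = 6
        · subst h6; decide
        · rw [PySem.Dict.getD]
          simp only [PySem.Dict.ofList, PySem.Dict.update, PySem.Dict.empty]
          norm_num [PySem.Dict.insert, PySem.Dict.get?, PySem.Dict.get?_mk_cons, List.foldl,
            Ne.symm h3, Ne.symm h4, Ne.symm h5, Ne.symm h6]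

-- the destination key is a valid block index
theorem pv_dest_bounds (version nb : Int)
    (hnb : nb = 2 ∨ nb = 4) (h5 : version = 5 → nb = 4) (i : Int) :
    0 ≤ pvDest version nb i ∧ (pvDest version nb i).toNat < nb.toNat := by
  have hpos : 0 < nb := by rcases hnb with h | h <;> omega
  unfold pvDest
  split_ifs with h1 h2
  · simp only [Bool.and_eq_true, beq_iff_eq] at h1
    have := h5 h1.1; omega
  · simp only [Bool.and_eq_true, beq_iff_eq] at h2
    have := h5 h2.1; omega
  · have := pv_mod_bounds i nb hpos
    omega

-- A's loop body is the scatter step for B's key function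
theorem pv_body_eq (version nb : Int) (h5 : version = 5 → nb = 4) :
    (fun (blocks : List (List (List Char))) (p : Int × List Char) =>
      let i := p.1
      let byte := p.2
      if version == 5 then
        if i == 44 then
          PySem.List.pySetD blocks 2 (PySem.List.pyGetD blocks 2 [] ++ [byte])
        else if i == 45 then
          PySem.List.pySetD blocks 3 (PySem.List.pyGetD blocks 3 [] ++ [byte])
        else
          PySem.List.pySetD blocks (PySem.Int.mod i 4)
            (PySem.List.pyGetD blocks (PySem.Int.mod i 4) [] ++ [byte])
      else
        PySem.List.pySetD blocks (PySem.Int.mod i nb)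
          (PySem.List.pyGetD blocks (PySem.Int.mod i nb) [] ++ [byte]))
    = (fun blocks p =>
        PySem.List.pySetD blocks (pvDest version nb p.1)
          (PySem.List.pyGetD blocks (pvDest version nb p.1) [] ++ [p.2])) := by
  funext blocks p
  simp only [pvDest]
  by_cases hv : version = 5
  · rw [h5 hv]
    subst hv
    by_cases h44 : p.1 = 44
    · simp [h44]
    · by_cases h45 : p.1 = 45 <;> simp [h44, h45]
  · have : (version == 5) = false := by simp [hv]
    simp [this]

-- ===== VERDICT (by name: the statement is the Claim_ definition above) =====
theorem rearrange_qr_data_spec : Claim_equal_rearrange_qr_data := by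
  intro bitstream version _
  unfold Spec_rearrange_qr_data rearrange_qr_data rearrange_qr_data_alt
  by_cases hv : version ≤ 2
  · simp [hv]
  · rw [if_neg hv, if_neg hv]
    set byte_list : List (List Char) :=
      (PySem.List.pyRange 0 (PySem.Str.len bitstream) 8).map
        (fun i => PySem.List.slice bitstream.toList (some i) (some (i + 8))) with hbl
    set nb : Int :=
      PySem.Dict.getD (PySem.Dict.ofList ([(3, 2), (4, 4), (5, 4), (6, 4)] : List (Int × Int))) version 4 with hnbdef
    have hnb : nb = 2 ∨ nb = 4 := by rw [hnbdef]; exact pv_nb_cases version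
    have h5 : version = 5 → nb = 4 := by intro h; rw [hnbdef, h]; decide
    have hlen : ((PySem.List.pyRange 0 nb 1).map
        (fun _ => ([] : List (List Char)))).length = nb.toNat := by
      simp [PySem.List.length_pyRange_one]
    simp only [pv_body_eq version nb h5]
    rw [pv_scatter_spec (pvDest version nb) nb.toNat
          (pv_dest_bounds version nb hnb h5) _ _ hlen]
    congr 1
    have hrange : PySem.List.pyRange 0 nb 1
        = (List.range nb.toNat).map (fun k => ((k : Nat) : Int)) := by
      rw [PySem.List.pyRange_one]
      simp
    rw [pv_join_nil_eq_flatten, pv_join_nil_eq_flatten, hrange]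
    simp only [List.map_map, Function.comp_def, pv_getD_map_const, List.nil_append,
      pv_join_nil_eq_flatten, List.flatMap_map]
    rw [← List.flatMap_def, pv_flatten_flatMap]
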